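-- pv_equiv track=rewrite | github.com/alsdn1360/BOJ_Python | 프로그래머스/3/12987. 숫자 게임/숫자 게임.py | solution
-- ===== SOURCE A (Python) =====
-- def solution(A, B):
--     # 아예 이길 수 없으면 0 리턴
--     if min(A) > max(B):
--         return 0
--
--     answer = 0
--
--     A.sort()
--     B.sort()
--
--     n = len(A)
--
--     b_idx = 0
--
--     # A의 낮은 수부터 B의 가장 작은 수로 이길 수 있는 수를 내면 됨
--     for a_idx in range(n):
--         if b_idx == n:
--             break
--
--         while b_idx < n and B[b_idx] <= A[a_idx]:
--             b_idx += 1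
--
--         if b_idx < n and B[b_idx] > A[a_idx]:
--             answer += 1
--             b_idx += 1
--
--     return answer
-- ===== SOURCE B (Python) =====
-- def solution(A, B):
--     # Binary search on the number of wins: over the n rounds of the game, k wins
--     # are securable exactly when B's k-th-strongest relevant cards beat A's k
--     # weakest cards one-for-one, and that feasibility is monotone in k.
--     # (Return-value equivalent; does not sort its arguments in place.)
--     n = len(A)
--     a = sorted(A)
--     b = sorted(B)
--
--     def wins(k):
--         return all(a[i] < b[n - k + i] for i in range(k))
--
--     lo, hi = 0, n
--     while lo < hi:
--         mid = (lo + hi + 1) // 2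
--         if wins(mid):
--             lo = mid
--         else:
--             hi = mid - 1
--     return lo
-- ===== Notes on version B (the rewrite author's own statement) =====
-- stated objective: alternative
-- what changed: A sweeps both sorted lists bottom-up with a nested while loop that greedily consumes B's smallest winning card for each of the n rounds; B binary-searches on the answer k, deciding each candidate by a direct feasibility test (B's k strongest relevant cards beat A's k weakest cards one-for-one, a monotone predicate). Pre_ excludes empty hands and a B shorter than A: there A raises (ValueError/IndexError) except in the one all-lose corner, where B's n-round indexing would read past B.
-- outside the precondition, e.g. on solution([9, 9], [1]): A returns 0, B raises IndexError
import Mathlib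
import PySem

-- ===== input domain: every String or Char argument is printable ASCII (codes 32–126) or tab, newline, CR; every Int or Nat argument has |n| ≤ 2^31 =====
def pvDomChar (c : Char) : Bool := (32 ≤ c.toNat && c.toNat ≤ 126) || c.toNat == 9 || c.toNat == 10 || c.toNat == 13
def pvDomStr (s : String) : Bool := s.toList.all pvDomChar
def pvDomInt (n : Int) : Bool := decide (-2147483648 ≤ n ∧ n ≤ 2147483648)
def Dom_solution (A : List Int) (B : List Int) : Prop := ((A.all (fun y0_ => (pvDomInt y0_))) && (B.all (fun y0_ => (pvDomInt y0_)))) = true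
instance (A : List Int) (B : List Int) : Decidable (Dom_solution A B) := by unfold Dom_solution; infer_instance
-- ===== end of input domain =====

-- B replaces A's greedy bottom-up sweep by a binary search on the number of wins k, each
-- candidate decided by a direct feasibility test (B's k strongest relevant cards beat A's k
-- weakest cards one-for-one); return values agree on Pre_. A sorts its arguments in place (a
-- side effect B does not perform) — the claim is about the return value only.

-- ===== PORT A =====
-- inner `while b_idx < n and B[b_idx] <= A[a_idx]: b_idx += 1`
def solWhile (B : List Int) (n : Nat) (a : Int) (j : Nat) : Nat :=
  if j < n then
    if PySem.List.pyGetD B (j : Int) 0 ≤ a then solWhile B n a (j + 1) else j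
  else j
termination_by n - j

-- `for a_idx in range(n): …` with the `break` and the win check
def solFor (A B : List Int) (n : Nat) (a_idx b_idx : Nat) (answer : Int) : Int :=
  if a_idx < n then
    if b_idx = n then answer
    else
      let a := PySem.List.pyGetD A (a_idx : Int) 0
      let j := solWhile B n a b_idx
      if j < n then
        if a < PySem.List.pyGetD B (j : Int) 0 then
          solFor A B n (a_idx + 1) (j + 1) (answer + 1)
        else
          solFor A B n (a_idx + 1) j answer
      else
        solFor A B n (a_idx + 1) j answer
  else answer
termination_by n - a_idx

def solution (A : List Int) (B : List Int) : Int :=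
  match PySem.List.min? A (fun x => x), PySem.List.max? B (fun x => x) with
  | some mA, some mB =>
      if mB < mA then 0
      else
        let As := PySem.List.sorted A (fun x => x)
        let Bs := PySem.List.sorted B (fun x => x)
        let n := As.length
        solFor As Bs n 0 0 0
  | _, _ => 0   -- min/max on an empty list raises ValueError: outside Pre_

-- ===== PORT B =====
-- `wins(k)`: all(a[i] < b[n - k + i] for i in range(k))
def altWins (a b : List Int) (n k : Int) : Bool :=
  (PySem.List.pyRange 0 k 1).all (fun i =>
    decide (PySem.List.pyGetD a i 0 < PySem.List.pyGetD b (n - k + i) 0))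

-- `while lo < hi: mid = (lo + hi + 1) // 2; …` (lo, hi stay nonnegative in Python, so Nat;
-- Nat division agrees with Python's // on nonnegative operands)
def altSearch (a b : List Int) (n : Int) (lo hi : Nat) : Nat :=
  if lo < hi then
    let mid := (lo + hi + 1) / 2
    if altWins a b n (mid : Int) then altSearch a b n mid hi else altSearch a b n lo (mid - 1)
  else lo
termination_by hi - lo
decreasing_by all_goals omega

def solution_alt (A : List Int) (B : List Int) : Int :=
  let n := A.length
  let a := PySem.List.sorted A (fun x => x)
  let b := PySem.List.sorted B (fun x => x)
  ((altSearch a b (n : Int) 0 n : Nat) : Int)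

-- ===== PRECONDITION & SPEC =====
-- Pre_ excludes exactly the inputs outside the game's domain of two hands with enough cards
-- on B's side: empty hands (A's min/max raise ValueError) and a B shorter than A, where A
-- raises IndexError once any A card is beatable; the one returning corner there (every A card
-- beats every B card, so the guard returns 0) is excluded with it because B's n-round
-- indexing reads past the end of B.
def Pre_solution (A : List Int) (B : List Int) : Prop :=
  A ≠ [] ∧ B ≠ [] ∧ A.length ≤ B.length
instance (A : List Int) (B : List Int) : Decidable (Pre_solution A B) := by unfold Pre_solution; infer_instance

def pvWitness_solution : List Int × List Int := ([5, 1, 3], [2, 4, 6])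

def Spec_solution (A : List Int) (B : List Int) (out : Int) : Prop := out = solution_alt A B
instance (A : List Int) (B : List Int) (out : Int) : Decidable (Spec_solution A B out) := by unfold Spec_solution; infer_instance

-- ===== CLAIM (what is proved, stated in full; the proofs are below) =====
def Claim_equal_solution : Prop := ∀ (A : List Int) (B : List Int), Dom_solution A B → Pre_solution A B → Spec_solution A B (solution A B)

-- ===== LEMMAS AND PROOFS =====

-- abstract form of A's sweep: bottom-up greedy over ascending lists (Nat-valued)
def cN : List Int → List Int → Nat
  | [], _ => 0
  | a :: as, bs =>
    match bs.dropWhile (fun b => decide (b ≤ a)) with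
    | [] => 0
    | _ :: bt => 1 + cN as bt

-- Int twin used to characterise A's loop (A's accumulator is a Python int)
def cA : List Int → List Int → Int
  | [], _ => 0
  | a :: as, bs =>
    match bs.dropWhile (fun b => decide (b ≤ a)) with
    | [] => 0
    | _ :: bt => 1 + cA as bt

theorem cA_eq_cN (a : List Int) : ∀ b : List Int, cA a b = (cN a b : Int) := by
  induction a with
  | nil => intro b; rfl
  | cons x as ih =>
      intro b
      cases h : b.dropWhile (fun z => decide (z ≤ x)) with
      | nil => simp [cA, cN, h]
      | cons y bt => simp [cA, cN, h, ih]

theorem cA_nil_right (as : List Int) : cA as [] = 0 := by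
  cases as <;> simp [cA]

theorem cA_cons_of_nil {a : Int} {as bs : List Int}
    (h : bs.dropWhile (fun b => decide (b ≤ a)) = []) : cA (a :: as) bs = 0 := by
  simp [cA, h]

theorem cA_cons_of_cons {a b0 : Int} {as bs bt : List Int}
    (h : bs.dropWhile (fun b => decide (b ≤ a)) = b0 :: bt) :
    cA (a :: as) bs = 1 + cA as bt := by
  simp [cA, h]

-- the first survivor of dropWhile fails the predicate (glue for A's while loop)
theorem dropWhile_eq_cons_head_false {p : Int → Bool} :
    ∀ {l : List Int} {b : Int} {bt : List Int}, l.dropWhile p = b :: bt → p b = false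
  | [], _, _, h => by simp at h
  | x :: xs, b, bt, h => by
      by_cases hx : p x
      · rw [List.dropWhile_cons_of_pos hx] at h
        exact dropWhile_eq_cons_head_false h
      · rw [List.dropWhile_cons_of_neg hx] at h
        cases h
        simpa using hx

-- the greedy count never exceeds either hand
theorem cN_le (a : List Int) : ∀ b : List Int, cN a b ≤ min a.length b.length := by
  induction a with
  | nil => intro b; simp [cN]
  | cons x as ih =>
      intro b
      cases h : b.dropWhile (fun z => decide (z ≤ x)) with
      | nil => simp [cN, h]
      | cons y bt =>
          have hsub : (y :: bt).Sublist b := h ▸ List.dropWhile_sublist _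
          have hlen : bt.length + 1 ≤ b.length := by
            have := hsub.length_le; simpa using this
          have := ih bt
          simp only [cN, h, List.length_cons]
          omega

-- when every B card loses to every A card the greedy count is zero
theorem cN_zero (a b : List Int) (h : ∀ x ∈ a, ∀ z ∈ b, z < x) : cN a b = 0 := by
  cases a with
  | nil => rfl
  | cons x as =>
      have hd : b.dropWhile (fun z => decide (z ≤ x)) = [] := by
        rw [List.dropWhile_eq_nil_iff]
        intro z hz
        have := h x (by simp) z hz
        simp; omega
      simp [cN, hd]

-- dropping past the whole ≤-prefix and the pivot lands inside the tail
theorem drop_append_cons (tw : List Int) (y : Int) (bt : List Int) (t : Nat) :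
    (tw ++ y :: bt).drop (tw.length + 1 + t) = bt.drop t := by
  have h2 : tw.length + 1 + t = tw.length + (1 + t) := by omega
  have h1 : (tw ++ y :: bt).drop (tw.length + (1 + t)) = (y :: bt).drop (1 + t) := by
    simp [List.drop_append]
  rw [h2, h1, Nat.add_comm, List.drop_succ_cons]

-- feasibility of k wins: the k smallest of a against the k largest of b, one-for-one
-- T1: the greedy count is feasible
theorem cN_feas (a : List Int) : ∀ b : List Int, b.Pairwise (fun x y => x ≤ y) →
    List.Forall₂ (fun x y => x < y) (a.take (cN a b)) (b.drop (b.length - cN a b)) := by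
  induction a with
  | nil => intro b _; simp [cN]
  | cons x as ih =>
      intro b hb
      cases h : b.dropWhile (fun z => decide (z ≤ x)) with
      | nil => simp [cN, h]
      | cons y bt =>
          have hxy : x < y := by
            have := dropWhile_eq_cons_head_false h; simp at this; omega
          have hdec : b = b.takeWhile (fun z => decide (z ≤ x)) ++ y :: bt := by
            rw [← h, List.takeWhile_append_dropWhile]
          have hpw : (y :: bt).Pairwise (fun x y => x ≤ y) :=
            List.Pairwise.sublist (h ▸ List.dropWhile_sublist _) hb
          have hyle : ∀ z ∈ bt, y ≤ z := (List.pairwise_cons.mp hpw).1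
          have hbtpw : bt.Pairwise (fun x y => x ≤ y) := (List.pairwise_cons.mp hpw).2
          set j := (b.takeWhile (fun z => decide (z ≤ x))).length with hj
          set m := bt.length with hm
          have hblen : b.length = j + 1 + m := by
            rw [hdec]; simp [hj, hm]; omega
          set g := cN as bt with hg
          have hgle : g ≤ m := le_trans (cN_le as bt) (by omega)
          have hcN : cN (x :: as) b = 1 + g := by simp [cN, h, hg]
          rw [hcN]
          have htake : (x :: as).take (1 + g) = x :: as.take g := by
            rw [Nat.add_comm, List.take_succ_cons]
          rw [htake]
          rcases Nat.lt_or_ge g m with hlt | hge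
          · -- g < m: drop lands inside bt
            have hidx : b.length - (1 + g) = j + 1 + (m - g - 1) := by omega
            have hdrop : b.drop (b.length - (1 + g)) = bt.drop (m - g - 1) := by
              rw [hidx, hdec]
              exact drop_append_cons _ y bt _
            have hcons : bt.drop (m - g - 1) = bt[m - g - 1] :: bt.drop (m - g) := by
              have h1 : m - g - 1 < bt.length := by omega
              have h2 : m - g - 1 + 1 = m - g := by omega
              rw [List.drop_eq_getElem_cons h1, h2]
            rw [hdrop, hcons]
            refine List.Forall₂.cons ?_ ?_
            · exact lt_of_lt_of_le hxy (hyle _ (List.getElem_mem _))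
            · exact ih bt hbtpw
          · -- g = m: drop lands on y :: bt
            have hgm : g = m := by omega
            have hidx : b.length - (1 + g) = j := by omega
            have hdrop : b.drop (b.length - (1 + g)) = y :: bt := by
              rw [hidx, hdec, hj]; exact List.drop_left
            rw [hdrop]
            refine List.Forall₂.cons hxy ?_
            have h0 : bt.length - g = 0 := by omega
            have := ih bt hbtpw
            rw [h0, List.drop_zero] at this
            exact this
  
-- T2: one more win than the greedy count is infeasible
theorem cN_not_feas (a : List Int) : ∀ b : List Int, b.Pairwise (fun x y => x ≤ y) →
    cN a b + 1 ≤ min a.length b.length →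
    ¬ List.Forall₂ (fun x y => x < y) (a.take (cN a b + 1)) (b.drop (b.length - (cN a b + 1))) := by
  induction a with
  | nil => intro b _ hle; simp at hle
  | cons x as ih =>
      intro b hb hle hf
      cases h : b.dropWhile (fun z => decide (z ≤ x)) with
      | nil =>
          -- greedy count 0; the pair (x, last of b) already fails
          have hall : ∀ z ∈ b, z ≤ x := by
            rw [List.dropWhile_eq_nil_iff] at h
            intro z hz; have := h z hz; simpa using this
          have hcN : cN (x :: as) b = 0 := by simp [cN, h]
          rw [hcN] at hf hle
          simp only [List.take_succ_cons, List.take_zero] at hf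
          have h1 : b.length - 1 < b.length := by simp at hle; omega
          rw [List.drop_eq_getElem_cons h1] at hf
          cases hf with
          | cons hxy _ =>
              have := hall _ (List.getElem_mem h1)
              omega
      | cons y bt =>
          have hdec : b = b.takeWhile (fun z => decide (z ≤ x)) ++ y :: bt := by
            rw [← h, List.takeWhile_append_dropWhile]
          have hpw : (y :: bt).Pairwise (fun x y => x ≤ y) :=
            List.Pairwise.sublist (h ▸ List.dropWhile_sublist _) hb
          have hbtpw : bt.Pairwise (fun x y => x ≤ y) := (List.pairwise_cons.mp hpw).2
          set j := (b.takeWhile (fun z => decide (z ≤ x))).length with hj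
          set m := bt.length with hm
          have hblen : b.length = j + 1 + m := by
            rw [hdec]; simp [hj, hm]; omega
          set g := cN as bt with hg
          have hgle : g ≤ m := le_trans (cN_le as bt) (by omega)
          have hcN : cN (x :: as) b = 1 + g := by simp [cN, h, hg]
          rw [hcN] at hf hle
          have hlea : g + 2 ≤ as.length + 1 := by simp at hle; omega
          have hleb : g + 2 ≤ b.length := by simp at hle; omega
          have htake : (x :: as).take (1 + g + 1) = x :: as.take (g + 1) := by
            have : 1 + g + 1 = (g + 1) + 1 := by omega
            rw [this, List.take_succ_cons]
          rw [htake] at hf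
          rcases Nat.lt_or_ge (g + 1) m with hlt2 | hge2
          · -- the drop lands strictly inside bt
            have hidx : b.length - (1 + g + 1) = j + 1 + (m - g - 2) := by omega
            have hdrop : b.drop (b.length - (1 + g + 1)) = bt.drop (m - g - 2) := by
              rw [hidx, hdec]
              exact drop_append_cons _ y bt _
            have hcons : bt.drop (m - g - 2) = bt[m - g - 2] :: bt.drop (m - (g + 1)) := by
              have h1 : m - g - 2 < bt.length := by omega
              have h2 : m - g - 2 + 1 = m - (g + 1) := by omega
              rw [List.drop_eq_getElem_cons h1, h2]
            rw [hdrop, hcons] at hf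
            cases hf with
            | cons _ htail =>
                refine ih bt hbtpw (by omega) ?_
                have h0 : bt.length - (g + 1) = m - (g + 1) := by omega
                rw [h0]
                exact htail
          rcases Nat.lt_or_ge g m with hlt3 | hge3
          · -- g + 1 = m: the drop starts at the pivot
            have hm1 : m = g + 1 := by omega
            have hidx : b.length - (1 + g + 1) = j := by omega
            have hdrop : b.drop (b.length - (1 + g + 1)) = y :: bt := by
              rw [hidx, hdec, hj]; exact List.drop_left
            rw [hdrop] at hf
            cases hf with
            | cons _ htail =>
                refine ih bt hbtpw (by omega) ?_
                have h0 : bt.length - (g + 1) = 0 := by omega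
                rw [h0, List.drop_zero]
                exact htail
          · -- g = m: the head of the assumed pairing meets a card from the ≤ x prefix
            have hgm : g = m := by omega
            have hjpos : 1 ≤ j := by omega
            have hidx : b.length - (1 + g + 1) = j - 1 := by omega
            have hj1 : j - 1 < b.length := by omega
            rw [hidx, List.drop_eq_getElem_cons hj1] at hf
            have hjt : j - 1 < (b.takeWhile (fun z => decide (z ≤ x))).length := by omega
            have hstep : b[j - 1] = (b.takeWhile (fun z => decide (z ≤ x)))[j - 1] := by
              rw [List.getElem_of_eq hdec hj1]
              exact List.getElem_append_left hjt
            have hmem : b[j - 1] ≤ x := by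
              have hval : b[j - 1] ∈ b.takeWhile (fun z => decide (z ≤ x)) := by
                rw [hstep]; exact List.getElem_mem hjt
              have := List.mem_takeWhile_imp hval
              simpa using this
            cases hf with
            | cons hxy _ => omega

-- the feasibility predicate exactly as B's wins(k) evaluates it
def Wb (a b : List Int) (k : Nat) : Bool :=
  ((a.take k).zip (b.drop (b.length - k))).all (fun p => decide (p.1 < p.2))

-- wins(k) = the Forall₂ feasibility, for the k the search actually probes
theorem Wb_iff (a b : List Int) (k : Nat) (hk : k ≤ min a.length b.length) :
    Wb a b k = true ↔
      List.Forall₂ (fun x y => x < y) (a.take k) (b.drop (b.length - k)) := by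
  rw [Wb, List.all_eq_true, List.forall₂_iff_zip]
  constructor
  · intro hz
    refine ⟨by simp; omega, ?_⟩
    intro u v huv
    have := hz (u, v) huv
    simpa using this
  · rintro ⟨-, hz⟩ p hp
    simpa using hz (by simpa using hp)

-- feasibility is monotone downward in k (b ascending)
theorem feas_mono_step (a b : List Int) (hb : b.Pairwise (fun x y => x ≤ y)) (k : Nat)
    (hkb : k + 1 ≤ b.length)
    (hf : List.Forall₂ (fun x y => x < y) (a.take (k + 1)) (b.drop (b.length - (k + 1)))) :
    List.Forall₂ (fun x y => x < y) (a.take k) (b.drop (b.length - k)) := by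
  rw [List.forall₂_iff_get] at hf ⊢
  obtain ⟨hlen, hget⟩ := hf
  have hdl : (b.drop (b.length - (k + 1))).length = k + 1 := by simp; omega
  have hka : k + 1 ≤ a.length := by
    rw [hdl] at hlen; simp at hlen; omega
  refine ⟨by simp; omega, ?_⟩
  intro i h1 h2
  have hik : i < k := by simp at h1; omega
  have hgi := hget i (by simp; omega) (by simp; omega)
  simp only [List.get_eq_getElem, List.getElem_take, List.getElem_drop] at hgi ⊢
  have hmono : b[b.length - (k + 1) + i] ≤ b[b.length - k + i] := by
    rcases List.pairwise_iff_getElem.mp hb (b.length - (k + 1) + i) (b.length - k + i)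
      (by omega) (by omega) (by omega) with hlt
    exact hlt
  omega

theorem feas_mono (a b : List Int) (hb : b.Pairwise (fun x y => x ≤ y)) (k l : Nat)
    (hkl : k ≤ l) (hlb : l ≤ b.length)
    (hf : List.Forall₂ (fun x y => x < y) (a.take l) (b.drop (b.length - l))) :
    List.Forall₂ (fun x y => x < y) (a.take k) (b.drop (b.length - k)) := by
  induction l with
  | zero =>
      have : k = 0 := by omega
      subst this; exact hf
  | succ l ih =>
      rcases Nat.eq_or_lt_of_le hkl with heq | hlt
      · subst heq; exact hf
      · exact ih (by omega) (by omega) (feas_mono_step a b hb l hlb hf)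

-- the port's wins(k) agrees with Wb over B's n relevant cards, for the probed k
theorem altWins_iff (a b : List Int) (n k : Nat) (hk : k ≤ n)
    (hna : n ≤ a.length) (hnb : n ≤ b.length) :
    altWins a b (n : Int) (k : Int) = true ↔ Wb a (b.take n) k = true := by
  have hbt : (b.take n).length = n := by simp; omega
  rw [Wb_iff a (b.take n) k (by simp; omega), hbt, List.forall₂_iff_get]
  unfold altWins
  rw [List.all_eq_true]
  constructor
  · intro h
    refine ⟨by simp; omega, ?_⟩
    intro i h1 h2
    have hik : i < k := by simp at h1; omega
    have hmem : ((i : Nat) : Int) ∈ PySem.List.pyRange 0 (k : Int) 1 := by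
      rw [PySem.List.mem_pyRange_one]; omega
    have hv := h _ hmem
    simp only [decide_eq_true_eq] at hv
    have hcast : (n : Int) - (k : Int) + (i : Int) = ((n - k + i : Nat) : Int) := by omega
    rw [hcast, PySem.List.pyGetD_natCast, PySem.List.pyGetD_natCast,
      List.getD_eq_getElem a 0 (by omega), List.getD_eq_getElem b 0 (by omega)] at hv
    simp only [List.get_eq_getElem, List.getElem_take, List.getElem_drop]
    exact hv
  · intro ⟨hlen, hget⟩ i hi
    rw [PySem.List.mem_pyRange_one] at hi
    have h0 : 0 ≤ i := hi.1
    have hik : i.toNat < k := by omega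
    have hv := hget i.toNat (by simp; omega) (by simp; omega)
    simp only [List.get_eq_getElem, List.getElem_take, List.getElem_drop] at hv
    have hcast1 : i = ((i.toNat : Nat) : Int) := by omega
    have hcast2 : (n : Int) - (k : Int) + i = ((n - k + i.toNat : Nat) : Int) := by omega
    simp only [decide_eq_true_eq]
    rw [hcast2, hcast1, PySem.List.pyGetD_natCast, PySem.List.pyGetD_natCast,
      List.getD_eq_getElem a 0 (by omega), List.getD_eq_getElem b 0 (by omega)]
    exact hv

-- the binary search maintains: lo is feasible, everything above hi is not
theorem altSearch_spec (a b : List Int) (n : Nat) (hna : n ≤ a.length) (hnb : n ≤ b.length)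
    (lo hi : Nat)
    (hmono : ∀ k l : Nat, k ≤ l → l ≤ n → Wb a (b.take n) l = true → Wb a (b.take n) k = true)
    (hlh : lo ≤ hi) (hhn : hi ≤ n)
    (h1 : Wb a (b.take n) lo = true)
    (h2 : ∀ k, hi < k → k ≤ n → Wb a (b.take n) k = false) :
    Wb a (b.take n) (altSearch a b (n : Int) lo hi) = true ∧
      altSearch a b (n : Int) lo hi ≤ n ∧
      (∀ k, altSearch a b (n : Int) lo hi < k → k ≤ n → Wb a (b.take n) k = false) := by
  unfold altSearch
  by_cases hlt : lo < hi
  · rw [if_pos hlt]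
    set mid := (lo + hi + 1) / 2 with hmid
    have hmlo : lo + 1 ≤ mid := by omega
    have hmhi : mid ≤ hi := by omega
    by_cases hw : altWins a b (n : Int) (mid : Int) = true
    · rw [if_pos hw]
      have hwmid : Wb a (b.take n) mid = true :=
        (altWins_iff a b n mid (by omega) hna hnb).mp hw
      exact altSearch_spec a b n hna hnb mid hi hmono (by omega) hhn hwmid h2
    · rw [if_neg hw]
      have hwmid : Wb a (b.take n) mid = false := by
        cases hq : Wb a (b.take n) mid with
        | false => rfl
        | true => exact absurd ((altWins_iff a b n mid (by omega) hna hnb).mpr hq) hw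
      refine altSearch_spec a b n hna hnb lo (mid - 1) hmono (by omega) (by omega) h1 ?_
      intro k hk1 hk2
      rcases Nat.lt_or_ge hi k with hgt | hle2
      · exact h2 k hgt hk2
      · cases hq : Wb a (b.take n) k with
        | false => rfl
        | true =>
            have := hmono mid k (by omega) (by omega) hq
            rw [hwmid] at this
            simp at this
  · rw [if_neg hlt]
    have : lo = hi := by omega
    subst this
    exact ⟨h1, by omega, h2⟩
termination_by hi - lo
decreasing_by all_goals omega

-- master lemma: B's binary search computes A's greedy count over B's n relevant cards
theorem altSearch_eq_cN (a b : List Int) (n : Nat) (hb : b.Pairwise (fun x y => x ≤ y))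
    (hna : n ≤ a.length) (hnb : n ≤ b.length) :
    altSearch a b (n : Int) 0 n = cN a (b.take n) := by
  have hbt : (b.take n).length = n := by simp; omega
  have hbs : (b.take n).Pairwise (fun x y => x ≤ y) :=
    List.Pairwise.sublist (List.take_sublist n b) hb
  have hmono : ∀ k l : Nat, k ≤ l → l ≤ n → Wb a (b.take n) l = true → Wb a (b.take n) k = true := by
    intro k l hkl hln hw
    have hf := (Wb_iff a (b.take n) l (by omega)).mp hw
    exact (Wb_iff a (b.take n) k (by omega)).mpr
      (feas_mono a (b.take n) hbs k l hkl (by omega) hf)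
  have h0 : Wb a (b.take n) 0 = true := by simp [Wb]
  obtain ⟨hr1, hrn, hr2⟩ := altSearch_spec a b n hna hnb 0 n hmono (Nat.zero_le _) le_rfl h0
    (fun k hk1 hk2 => absurd hk1 (by omega))
  set r := altSearch a b (n : Int) 0 n with hr
  have hgn : cN a (b.take n) ≤ n := by
    have := cN_le a (b.take n)
    omega
  have hg1 : Wb a (b.take n) (cN a (b.take n)) = true :=
    (Wb_iff a (b.take n) _ (by omega)).mpr (cN_feas a (b.take n) hbs)
  rcases lt_trichotomy r (cN a (b.take n)) with hlt | heq | hgt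
  · exfalso
    have hf := hr2 (r + 1) (by omega) (by omega)
    have ht := hmono (r + 1) (cN a (b.take n)) (by omega) hgn hg1
    rw [hf] at ht
    exact Bool.false_ne_true ht
  · exact heq
  · exfalso
    have hg2 : ¬ List.Forall₂ (fun x y => x < y) (a.take (cN a (b.take n) + 1))
        ((b.take n).drop ((b.take n).length - (cN a (b.take n) + 1))) :=
      cN_not_feas a (b.take n) hbs (by omega)
    have ht := hmono (cN a (b.take n) + 1) r (by omega) (by omega) hr1
    exact hg2 ((Wb_iff a (b.take n) _ (by omega)).mp ht)

-- B's whole program equals the greedy count over the ascending sorts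
theorem solution_alt_eq (A B : List Int) (h : A.length ≤ B.length) :
    solution_alt A B =
      (cN (PySem.List.sorted A (fun x => x))
        ((PySem.List.sorted B (fun x => x)).take A.length) : Int) := by
  show ((altSearch (PySem.List.sorted A (fun x => x)) (PySem.List.sorted B (fun x => x))
      ((A.length : Nat) : Int) 0 A.length : Nat) : Int) = _
  rw [altSearch_eq_cN _ _ A.length (PySem.List.sorted_pairwise B (fun x => x))
    (by rw [PySem.List.length_sorted]) (by rw [PySem.List.length_sorted]; exact h)]

-- ===== A-side loop characterisation (as in the port: index loops over the sorted lists) =====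

-- A's inner while loop skips exactly the prefix of B-values ≤ a
theorem solWhile_spec (B : List Int) (n : Nat) (a : Int) (j : Nat) (hn : n ≤ B.length) (hj : j ≤ n) :
    j ≤ solWhile B n a j ∧ solWhile B n a j ≤ n ∧
      (B.take n).drop (solWhile B n a j) = ((B.take n).drop j).dropWhile (fun x => decide (x ≤ a)) := by
  unfold solWhile
  by_cases h : j < n
  · rw [if_pos h]
    have hjB : j < B.length := lt_of_lt_of_le h hn
    have hjt : j < (B.take n).length := by simp; omega
    rw [List.drop_eq_getElem_cons hjt, PySem.List.pyGetD_natCast, List.getD_eq_getElem B 0 hjB,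
      List.getElem_take (h := hjt)]
    by_cases hle : B[j] ≤ a
    · rw [if_pos hle]
      have := solWhile_spec B n a (j + 1) hn (by omega)
      refine ⟨by omega, this.2.1, ?_⟩
      rw [this.2.2, List.dropWhile_cons_of_pos (by simpa using hle)]
    · rw [if_neg hle]
      refine ⟨le_refl j, by omega, ?_⟩
      rw [List.dropWhile_cons_of_neg (by simpa using hle)]
      rw [List.drop_eq_getElem_cons hjt, List.getElem_take (h := hjt)]
  · rw [if_neg h]
    have hjn : j = n := by omega
    subst hjn
    have hd : (B.take j).drop j = [] := List.drop_eq_nil_of_le (by simp)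
    rw [hd]
    exact ⟨le_refl j, le_refl j, rfl⟩
termination_by n - j

-- A's for loop computes the abstract bottom-up sweep on the remaining suffixes
theorem solFor_spec (A B : List Int) (hk : A.length ≤ B.length)
    (a_idx b_idx : Nat) (answer : Int) (hb : b_idx ≤ A.length) :
    solFor A B A.length a_idx b_idx answer =
      answer + cA (A.drop a_idx) ((B.take A.length).drop b_idx) := by
  unfold solFor
  by_cases ha : a_idx < A.length
  · rw [if_pos ha]
    by_cases hbn : b_idx = A.length
    · rw [if_pos hbn]
      have hd : (B.take A.length).drop A.length = [] :=
        List.drop_eq_nil_of_le (by rw [List.length_take]; exact Nat.min_le_left _ _)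
      rw [hbn, hd, cA_nil_right]
      ring
    · rw [if_neg hbn]
      rw [PySem.List.pyGetD_natCast, List.getD_eq_getElem A 0 ha]
      have hw := solWhile_spec B A.length A[a_idx] b_idx hk (by omega)
      set j := solWhile B A.length A[a_idx] b_idx with hj
      rw [List.drop_eq_getElem_cons ha]
      by_cases hjn : j < A.length
      · rw [if_pos hjn]
        have hjB : j < B.length := by omega
        have hjt : j < (B.take A.length).length := by simp; omega
        have h2 : ((B.take A.length).drop b_idx).dropWhile (fun x => decide (x ≤ A[a_idx])) =
            (B.take A.length)[j] :: (B.take A.length).drop (j + 1) := by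
          rw [← hw.2.2]; exact List.drop_eq_getElem_cons hjt
        have hgt : A[a_idx] < (B.take A.length)[j] := by
          have hh := dropWhile_eq_cons_head_false h2
          simpa using hh
        have hgt' : A[a_idx] < B[j] := by rwa [List.getElem_take (h := hjt)] at hgt
        rw [PySem.List.pyGetD_natCast, List.getD_eq_getElem B 0 hjB, if_pos hgt',
          solFor_spec A B hk (a_idx + 1) (j + 1) (answer + 1) (by omega),
          cA_cons_of_cons h2]
        ring
      · rw [if_neg hjn]
        have hjA : j = A.length := by omega
        have h2 : ((B.take A.length).drop b_idx).dropWhile (fun x => decide (x ≤ A[a_idx])) = [] := by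
          rw [← hw.2.2, hjA]
          exact List.drop_eq_nil_of_le (by rw [List.length_take]; exact Nat.min_le_left _ _)
        have hd : (B.take A.length).drop A.length = [] :=
          List.drop_eq_nil_of_le (by rw [List.length_take]; exact Nat.min_le_left _ _)
        rw [solFor_spec A B hk (a_idx + 1) j answer (by omega), hjA, hd,
          cA_nil_right, cA_cons_of_nil h2]
  · rw [if_neg ha]
    rw [List.drop_eq_nil_of_le (as := A) (by omega), cA]
    ring
termination_by A.length - a_idx

-- ===== VERDICT (by name: the statement is the Claim_ definition above) =====
theorem solution_spec : Claim_equal_solution := by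
  intro A B _ hPre
  obtain ⟨hA, hB, hlen⟩ := hPre
  unfold Spec_solution
  obtain ⟨mA, hmA⟩ : ∃ m, PySem.List.min? A (fun x => x) = some m := by
    cases h : PySem.List.min? A (fun x => x) with
    | none => exact absurd ((PySem.List.min?_eq_none_iff A _).mp h) hA
    | some m => exact ⟨m, rfl⟩
  obtain ⟨mB, hmB⟩ : ∃ m, PySem.List.max? B (fun x => x) = some m := by
    cases h : PySem.List.max? B (fun x => x) with
    | none => exact absurd ((PySem.List.max?_eq_none_iff B _).mp h) hB
    | some m => exact ⟨m, rfl⟩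
  unfold solution
  rw [hmA, hmB]
  dsimp only
  rw [solution_alt_eq A B hlen]
  set As := PySem.List.sorted A (fun x => x) with hAs
  set Bs := PySem.List.sorted B (fun x => x) with hBs
  by_cases hguard : mB < mA
  · rw [if_pos hguard]
    have hz : cN As (Bs.take A.length) = 0 := by
      apply cN_zero
      intro x hx z hz
      have hxA : x ∈ A := (PySem.List.sorted_perm A (fun x => x) false).mem_iff.mp hx
      have hzB : z ∈ B := (PySem.List.sorted_perm B (fun x => x) false).mem_iff.mp
        ((List.take_sublist A.length Bs).subset hz)
      have h1 := PySem.List.min?_isMin hmA x hxA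
      have h2 := PySem.List.max?_isMax hmB z hzB
      simp only at h1 h2
      omega
    rw [hz]
    rfl
  · rw [if_neg hguard]
    have hkl : As.length ≤ Bs.length := by
      rw [hAs, hBs, PySem.List.length_sorted, PySem.List.length_sorted]; exact hlen
    have hAl : As.length = A.length := by rw [hAs, PySem.List.length_sorted]
    rw [solFor_spec As Bs hkl 0 0 0 (by omega), List.drop_zero, List.drop_zero,
      hAl, cA_eq_cN]
    ring
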